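-- pv_equiv track=rewrite | github.com/cacaview/py-claw | src/py_claw/services/speculation/read_only_check.py | _extract_base_command
-- ===== SOURCE A (Python) =====
-- def _extract_base_command(command: str) -> str:
--     """Extract the base command (first word, no path) from a shell command.
--
--     Args:
--         command: Full shell command string
--
--     Returns:
--         Base command name without path
--     """
--     stripped = command.strip()
--
--     # Handle compound commands - split on pipe, &&, ||
--     for sep in (" | ", " || ", " && ", " > ", " >> ", " < ", " 2>", " & "):
--         if sep in stripped:
--             stripped = stripped.split(sep)[0].strip()
--
--     tokens = stripped.split()
--     if not tokens:
--         return ""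
--     return tokens[0].split("/")[-1]
-- ===== SOURCE B (Python) =====
-- def _extract_base_command(command: str) -> str:
--     tokens = command.split()
--     if not tokens:
--         return ""
--     return tokens[0].split("/")[-1]
-- ===== Notes on version B (the rewrite author's own statement) =====
-- stated objective: simpler
-- what changed: B drops A's strip and the whole 8-separator scan-and-cut loop and just returns the basename of the first whitespace token of command.split(); this is exact because every separator starts with a space, so a cut can never remove or alter the first token.
import Mathlib
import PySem

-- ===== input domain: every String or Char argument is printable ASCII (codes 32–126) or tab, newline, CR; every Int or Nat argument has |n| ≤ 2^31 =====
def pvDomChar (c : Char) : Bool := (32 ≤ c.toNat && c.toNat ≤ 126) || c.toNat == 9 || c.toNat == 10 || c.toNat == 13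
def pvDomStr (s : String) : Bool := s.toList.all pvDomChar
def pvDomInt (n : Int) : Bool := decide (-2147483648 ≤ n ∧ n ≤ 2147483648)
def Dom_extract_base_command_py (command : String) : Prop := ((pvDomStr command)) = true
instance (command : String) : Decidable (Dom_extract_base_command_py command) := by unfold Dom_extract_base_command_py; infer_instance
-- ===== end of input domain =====

-- B replaces A's strip + 8-separator cut loop by reading the first whitespace token directly:
-- every separator starts with a space, so no cut can change the first token (objective: simpler).

-- ===== PORT A =====
def extract_base_command_py (command : String) : String :=
  let stripped := PySem.Str.strip command
  -- for sep in (...): if sep in stripped: stripped = stripped.split(sep)[0].strip()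
  -- str.split(sep) with sep ≠ "" always returns a nonempty list, so the [0] never raises (headD)
  let stripped := [" | ", " || ", " && ", " > ", " >> ", " < ", " 2>", " & "].foldl
    (fun st sep =>
      if PySem.Str.isIn sep st then
        PySem.Str.strip (((PySem.Str.split? st sep).getD []).headD "")
      else st) stripped
  let tokens := PySem.Str.split₀ stripped
  if tokens.isEmpty then ""   -- if not tokens: return ""
  else ((PySem.Str.split? (tokens.headD "") "/").getD []).getLastD ""   -- tokens[0].split("/")[-1]; both lists nonempty here

-- ===== PORT B =====
def extract_base_command_py_alt (command : String) : String :=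
  let tokens := PySem.Str.split₀ command
  if tokens.isEmpty then ""
  else ((PySem.Str.split? (tokens.headD "") "/").getD []).getLastD ""

-- ===== PRECONDITION & SPEC =====
def Spec_extract_base_command_py (command : String) (out : String) : Prop := out = extract_base_command_py_alt command
instance (command : String) (out : String) : Decidable (Spec_extract_base_command_py command out) := by unfold Spec_extract_base_command_py; infer_instance

-- ===== CLAIM (what is proved, stated in full; the proofs are below) =====
def Claim_equal_extract_base_command_py : Prop := ∀ (command : String), Dom_extract_base_command_py command → Spec_extract_base_command_py command (extract_base_command_py command)

-- ===== LEMMAS AND PROOFS =====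

-- `fw l` = the first whitespace-delimited token of l (as Python's str.split() finds it)
def fw (l : List Char) : List Char :=
  (l.dropWhile PySem.Chars.isspace).takeWhile (fun c => !PySem.Chars.isspace c)

-- accumulator-free mirror of PySem.Chars.split₀.go
def spMirror : List Char → List Char → List (List Char)
  | [], cur => if cur.isEmpty then [] else [cur.reverse]
  | c :: rest, cur =>
    if PySem.Chars.isspace c then
      (if cur.isEmpty then spMirror rest [] else cur.reverse :: spMirror rest [])
    else spMirror rest (c :: cur)

-- first piece produced by PySem.Chars.splitOn.go
def fpMirror (sep : List Char) : Nat → List Char → List Char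
  | 0, l => l
  | _ + 1, [] => []
  | f + 1, c :: rest => if sep.isPrefixOf (c :: rest) then [] else c :: fpMirror sep f rest

theorem go_eq_spMirror (s cur acc) :
    PySem.Chars.split₀.go s cur acc = acc.reverse ++ spMirror s cur := by
  induction s generalizing cur acc with
  | nil => simp [PySem.Chars.split₀.go, spMirror]; split_ifs <;> simp
  | cons c rest ih =>
    simp only [PySem.Chars.split₀.go, spMirror]
    split_ifs with h1 h2 <;> simp [ih]

theorem head?_spMirror_ne (s cur) (h : cur ≠ []) :
    (spMirror s cur).head? = some (cur.reverse ++ s.takeWhile (fun c => !PySem.Chars.isspace c)) := by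
  induction s generalizing cur with
  | nil => simp [spMirror, h]
  | cons c rest ih =>
    simp only [spMirror, List.takeWhile_cons]
    by_cases hc : PySem.Chars.isspace c <;> simp [hc, h, ih]

theorem head?_split₀ (l : List Char) :
    (PySem.Chars.split₀ l).head? = if fw l = [] then none else some (fw l) := by
  show (PySem.Chars.split₀.go l [] []).head? = _
  rw [go_eq_spMirror]
  simp only [List.reverse_nil, List.nil_append]
  induction l with
  | nil => simp [spMirror, fw]
  | cons c rest ih =>
    by_cases hc : PySem.Chars.isspace c
    · simpa [spMirror, hc, fw] using ih
    · simp [spMirror, hc, fw, head?_spMirror_ne]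

theorem go_head_fp (sep : List Char) (fuel : Nat) :
    ∀ (l cur : List Char) (acc : List (List Char)), ∃ r, PySem.Chars.splitOn.go sep fuel l cur acc
      = acc.reverse ++ (cur.reverse ++ fpMirror sep fuel l) :: r := by
  induction fuel with
  | zero => intro l cur acc; exact ⟨[], by simp [PySem.Chars.splitOn.go, fpMirror]⟩
  | succ f ih =>
    intro l cur acc
    cases l with
    | nil => exact ⟨[], by simp [PySem.Chars.splitOn.go, fpMirror]⟩
    | cons c rest =>
      by_cases hp : sep.isPrefixOf (c :: rest)
      · obtain ⟨r, hr⟩ := ih (List.drop sep.length (c :: rest)) [] (cur.reverse :: acc)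
        refine ⟨fpMirror sep f (List.drop sep.length (c :: rest)) :: r, ?_⟩
        simp only [PySem.Chars.splitOn.go, fpMirror, hp, hr]
        simp
      · obtain ⟨r, hr⟩ := ih rest (c :: cur) acc
        refine ⟨r, ?_⟩
        simp only [PySem.Chars.splitOn.go, fpMirror, hp, hr,
          Bool.false_eq_true, if_false]
        simp

theorem head?_splitOn (l sep : List Char) :
    (PySem.Chars.splitOn l sep).head? = some (fpMirror sep (l.length + 1) l) := by
  obtain ⟨r, hr⟩ := go_head_fp sep (l.length + 1) l [] []
  show (PySem.Chars.splitOn.go sep (l.length + 1) l [] []).head? = _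
  rw [hr]; simp

theorem dropWhile_ws_idem (p : Char → Bool) (l : List Char) :
    (l.dropWhile p).dropWhile p = l.dropWhile p := by
  induction l with
  | nil => rfl
  | cons c rest ih =>
    by_cases hc : p c <;> simp [ hc, ih]

theorem head?_dropWhile_not (p : Char → Bool) (l : List Char) (x : Char)
    (hx : (l.dropWhile p).head? = some x) : p x = false := by
  induction l with
  | nil => simp at hx
  | cons c rest ih =>
    by_cases hc : p c
    · rw [List.dropWhile_cons, if_pos hc] at hx; exact ih hx
    · rw [List.dropWhile_cons, if_neg hc] at hx
      simp only [List.head?_cons, Option.some_inj] at hx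
      subst hx; simpa using hc

theorem takeWhile_append_allws (u t : List Char) (hu : ∀ c ∈ u, PySem.Chars.isspace c = true) :
    (t ++ u).takeWhile (fun c => !PySem.Chars.isspace c) = t.takeWhile (fun c => !PySem.Chars.isspace c) := by
  induction t with
  | nil =>
    cases u with
    | nil => rfl
    | cons c u' => simp [ hu c (by simp)]
  | cons c t' ih =>
    by_cases hc : PySem.Chars.isspace c <;> simp [ hc, ih]

theorem fw_append_allws (t u : List Char) (hu : ∀ c ∈ u, PySem.Chars.isspace c = true) :
    fw (t ++ u) = fw t := by
  induction t with
  | nil =>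
    have : u.dropWhile PySem.Chars.isspace = [] := by
      rw [List.dropWhile_eq_nil_iff]; intro x hx; exact hu x hx
    simp [fw, this]
  | cons c t' ih =>
    by_cases hc : PySem.Chars.isspace c
    · simpa [fw, List.dropWhile_cons, hc] using ih
    · simp [fw, hc]
      exact takeWhile_append_allws u t' hu

theorem rstrip_decomp (l : List Char) :
    l = PySem.Chars.rstrip l ++ (l.reverse.takeWhile PySem.Chars.isspace).reverse
      ∧ ∀ c ∈ (l.reverse.takeWhile PySem.Chars.isspace).reverse, PySem.Chars.isspace c = true := by
  constructor
  · rw [PySem.Chars.rstrip, ← List.reverse_append, List.takeWhile_append_dropWhile,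
      List.reverse_reverse]
  · intro c hc
    exact List.mem_takeWhile_imp (List.mem_reverse.mp hc)

theorem fw_rstrip (l : List Char) : fw (PySem.Chars.rstrip l) = fw l := by
  obtain ⟨h1, h2⟩ := rstrip_decomp l
  conv_rhs => rw [h1]
  exact (fw_append_allws _ _ h2).symm

theorem fw_strip (l : List Char) : fw (PySem.Chars.strip l) = fw l := by
  show fw (PySem.Chars.rstrip (PySem.Chars.lstrip l)) = fw l
  rw [fw_rstrip]
  simp [PySem.Chars.lstrip, fw, dropWhile_ws_idem]

theorem rstrip_cons_not_ws (c : Char) (t : List Char) (hc : PySem.Chars.isspace c = false) :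
    PySem.Chars.rstrip (c :: t) = c :: PySem.Chars.rstrip t := by
  show (List.dropWhile _ (c :: t).reverse).reverse = _
  rw [List.reverse_cons, List.dropWhile_append]
  split_ifs with h
  · simp [ hc, PySem.Chars.rstrip, List.isEmpty_iff.mp h]
  · simp [PySem.Chars.rstrip]

theorem noLead_rstrip (x : List Char) (hx : x.dropWhile PySem.Chars.isspace = x) :
    (PySem.Chars.rstrip x).dropWhile PySem.Chars.isspace = PySem.Chars.rstrip x := by
  cases x with
  | nil => rfl
  | cons c t =>
    have hc : PySem.Chars.isspace c = false := by
      by_contra h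
      have htrue : PySem.Chars.isspace c = true := by simpa using h
      rw [List.dropWhile_cons, if_pos htrue] at hx
      have h1 := congrArg List.length hx
      have h2 := List.length_dropWhile_le PySem.Chars.isspace t
      simp at h1; omega
    rw [rstrip_cons_not_ws c t hc]
    simp [ hc]

theorem noLead_strip (l : List Char) :
    (PySem.Chars.strip l).dropWhile PySem.Chars.isspace = PySem.Chars.strip l :=
  noLead_rstrip (PySem.Chars.lstrip l) (dropWhile_ws_idem PySem.Chars.isspace l)

theorem fp_word (sr : List Char) (l : List Char) :
    ∀ fuel, l.length ≤ fuel →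
    fpMirror (' ' :: sr) fuel l
      = l.takeWhile (fun c => !PySem.Chars.isspace c)
        ++ fpMirror (' ' :: sr) (fuel - (l.takeWhile (fun c => !PySem.Chars.isspace c)).length)
             (l.dropWhile (fun c => !PySem.Chars.isspace c)) := by
  induction l with
  | nil => intro fuel _; simp
  | cons c rest ih =>
    intro fuel hf
    by_cases hc : PySem.Chars.isspace c
    · simp [ hc]
    · obtain ⟨f, rfl⟩ : ∃ f, fuel = f + 1 := by
        cases fuel with
        | zero => simp at hf
        | succ f => exact ⟨f, rfl⟩
      have hne : (' ' :: sr).isPrefixOf (c :: rest) = false := by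
        rw [Bool.eq_false_iff]
        intro hb
        have hpre := List.isPrefixOf_iff_prefix.mp hb
        have h2 := (List.cons_prefix_cons.mp hpre).1
        rw [← h2] at hc; exact hc (by decide)
      simp only [fpMirror, hne, Bool.false_eq_true, if_false]
      rw [ih f (by simpa using hf)]
      simp [ hc, Nat.succ_sub_succ]

theorem fw_of_word_append (w u : List Char) (hw : w ≠ [])
    (hws : ∀ c ∈ w, PySem.Chars.isspace c = false)
    (hu : ∀ c, u.head? = some c → PySem.Chars.isspace c = true) :
    fw (w ++ u) = w := by
  obtain ⟨c, w', rfl⟩ := List.exists_cons_of_ne_nil hw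
  have hc : PySem.Chars.isspace c = false := hws c (by simp)
  have htw : (c :: w').takeWhile (fun x => !PySem.Chars.isspace x) = c :: w' := by
    rw [List.takeWhile_eq_self_iff]
    intro x hx; simp [hws x hx]
  simp only [fw, List.cons_append, List.dropWhile_cons, hc, Bool.false_eq_true, if_false]
  rw [show (c :: (w' ++ u)) = (c :: w') ++ u by simp, List.takeWhile_append]
  rw [htw]
  simp only [List.length_cons]
  cases u with
  | nil => simp
  | cons d u' => simp [ hu d rfl]

theorem head?_fpMirror (sep : List Char) (f : Nat) (d : List Char) (x : Char)
    (hx : (fpMirror sep f d).head? = some x) : d.head? = some x := by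
  cases f with
  | zero => exact hx
  | succ f' =>
    cases d with
    | nil => simp [fpMirror] at hx
    | cons e d' =>
      simp only [fpMirror] at hx
      split_ifs at hx with hp
      · simp at hx
      · simpa using hx

theorem fw_fp (sr : List Char) (l : List Char) (fuel : Nat) (hf : l.length ≤ fuel)
    (hq : l.dropWhile PySem.Chars.isspace = l) :
    fw (fpMirror (' ' :: sr) fuel l) = fw l := by
  cases l with
  | nil => cases fuel <;> rfl
  | cons c rest =>
    have hc : PySem.Chars.isspace c = false := by
      by_contra h
      have htrue : PySem.Chars.isspace c = true := by simpa using h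
      rw [List.dropWhile_cons, if_pos htrue] at hq
      have h1 := congrArg List.length hq
      have h2 := List.length_dropWhile_le PySem.Chars.isspace rest
      simp at h1; omega
    rw [fp_word sr (c :: rest) fuel hf]
    have hwne : (c :: rest).takeWhile (fun x => !PySem.Chars.isspace x) ≠ [] := by
      simp [ hc]
    have hwws : ∀ x ∈ (c :: rest).takeWhile (fun x => !PySem.Chars.isspace x),
        PySem.Chars.isspace x = false := by
      intro x hx; simpa using List.mem_takeWhile_imp hx
    have hufp : ∀ x, (fpMirror (' ' :: sr)
        (fuel - ((c :: rest).takeWhile (fun x => !PySem.Chars.isspace x)).length)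
        ((c :: rest).dropWhile (fun x => !PySem.Chars.isspace x))).head? = some x →
        PySem.Chars.isspace x = true := by
      intro x hx
      have hdx := head?_fpMirror _ _ _ _ hx
      have := head?_dropWhile_not (fun c => !PySem.Chars.isspace c) (c :: rest) x hdx
      simpa using this
    rw [fw_of_word_append _ _ hwne hwws hufp]
    show _ = List.takeWhile _ (List.dropWhile PySem.Chars.isspace (c :: rest))
    rw [hq]

theorem fw_splitOn_head (sr st : List Char) (hq : st.dropWhile PySem.Chars.isspace = st) :
    fw ((PySem.Chars.splitOn st (' ' :: sr)).headD []) = fw st := by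
  have h := head?_splitOn st (' ' :: sr)
  have heq : (PySem.Chars.splitOn st (' ' :: sr)).headD [] = fpMirror (' ' :: sr) (st.length + 1) st := by
    cases hs : PySem.Chars.splitOn st (' ' :: sr) with
    | nil => rw [hs] at h; simp at h
    | cons a r => rw [hs] at h; simp at h; simp [h]
  rw [heq]
  exact fw_fp sr st (st.length + 1) (by omega) hq

-- the string-level invariant carried through A's separator loop
def LoopInv (command st : String) : Prop :=
  st.toList.dropWhile PySem.Chars.isspace = st.toList ∧ fw st.toList = fw command.toList

theorem step_preserves (command st sep : String) (hsep : sep.toList.head? = some ' ')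
    (h : LoopInv command st) :
    LoopInv command (if PySem.Str.isIn sep st then
        PySem.Str.strip (((PySem.Str.split? st sep).getD []).headD "") else st) := by
  obtain ⟨sr, hsr⟩ : ∃ sr, sep.toList = ' ' :: sr := by
    cases hs : sep.toList with
    | nil => rw [hs] at hsep; simp at hsep
    | cons a t => rw [hs] at hsep; simp at hsep; exact ⟨t, by rw [hsep]⟩
  by_cases hin : PySem.Str.isIn sep st
  · rw [if_pos hin]
    have hsepne : sep.toList.isEmpty = false := by simp [hsr]
    have hsplit : PySem.Str.split? st sep
        = some ((PySem.Chars.splitOn st.toList sep.toList).map String.ofList) := by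
      simp [PySem.Str.split?, PySem.Chars.split?, hsepne]
    have hhead : ((PySem.Str.split? st sep).getD []).headD ""
        = String.ofList ((PySem.Chars.splitOn st.toList sep.toList).headD []) := by
      rw [hsplit]
      cases hs : PySem.Chars.splitOn st.toList sep.toList with
      | nil =>
        have h2 := head?_splitOn st.toList sep.toList
        rw [hs] at h2; simp at h2
      | cons a r => simp
    rw [hhead]
    constructor
    · show (PySem.Str.strip _).toList.dropWhile _ = (PySem.Str.strip _).toList
      simp only [PySem.Str.strip, String.toList_ofList]
      exact noLead_strip _
    · show fw (PySem.Str.strip _).toList = _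
      simp only [PySem.Str.strip, String.toList_ofList]
      rw [fw_strip, hsr, fw_splitOn_head sr st.toList h.1, h.2]
  · rwa [if_neg hin]

theorem foldl_preserves (command : String) (seps : List String)
    (hseps : ∀ s ∈ seps, s.toList.head? = some ' ') (st : String) (h : LoopInv command st) :
    LoopInv command (seps.foldl (fun st sep =>
      if PySem.Str.isIn sep st then
        PySem.Str.strip (((PySem.Str.split? st sep).getD []).headD "") else st) st) := by
  induction seps generalizing st with
  | nil => exact h
  | cons s rest ih =>
    exact ih (fun x hx => hseps x (by simp [hx])) _
      (step_preserves command st s (hseps s (by simp)) h)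

theorem ite_head_eq (g : String → String) (L1 L2 : List String) (h : L1.head? = L2.head?) :
    (if L1.isEmpty then "" else g (L1.headD ""))
      = (if L2.isEmpty then "" else g (L2.headD "")) := by
  cases L1 <;> cases L2 <;> simp_all

-- ===== VERDICT (by name: the statement is the Claim_ definition above) =====
set_option maxHeartbeats 1000000 in
theorem extract_base_command_py_spec : Claim_equal_extract_base_command_py := by
  intro command _
  have hinit : LoopInv command (PySem.Str.strip command) := by
    constructor
    · simp only [PySem.Str.strip, String.toList_ofList]; exact noLead_strip _
    · simp only [PySem.Str.strip, String.toList_ofList]; exact fw_strip _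
  have hinv := foldl_preserves command
    [" | ", " || ", " && ", " > ", " >> ", " < ", " 2>", " & "]
    (by decide) (PySem.Str.strip command) hinit
  show (let tokens := PySem.Str.split₀ ([" | ", " || ", " && ", " > ", " >> ", " < ", " 2>", " & "].foldl
          (fun st sep => if PySem.Str.isIn sep st then
              PySem.Str.strip (((PySem.Str.split? st sep).getD []).headD "") else st)
          (PySem.Str.strip command))
        if tokens.isEmpty then ""
        else ((PySem.Str.split? (tokens.headD "") "/").getD []).getLastD "")
      = (let tokens := PySem.Str.split₀ command
        if tokens.isEmpty then ""
        else ((PySem.Str.split? (tokens.headD "") "/").getD []).getLastD "")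
  refine ite_head_eq (fun t => ((PySem.Str.split? t "/").getD []).getLastD "")
    (PySem.Str.split₀ ([" | ", " || ", " && ", " > ", " >> ", " < ", " 2>", " & "].foldl
      (fun st sep => if PySem.Str.isIn sep st then
          PySem.Str.strip (((PySem.Str.split? st sep).getD []).headD "") else st)
      (PySem.Str.strip command)))
    (PySem.Str.split₀ command) ?_
  show (List.map String.ofList (PySem.Chars.split₀ _)).head?
      = (List.map String.ofList (PySem.Chars.split₀ _)).head?
  rw [List.head?_map, List.head?_map, head?_split₀, head?_split₀, hinv.2]
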